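-- pv_equiv track=rewrite | github.com/gunoopy/algorithm | programmers/Level3/보석쇼핑.py | solution
-- ===== SOURCE A (Python) =====
-- def solution(gems):
--     visited = []
--     start = 0
--     end = len(gems) - 1
--
--     for i, gem in enumerate(gems) :
--         if gem not in visited :
--             visited.append(gem)
--             end = i
--
--
--
--     [1, 2, 2, 1, 1, 3, 4, 1]
--
--     answer = [start+1, end+1]
--     return answer
-- ===== SOURCE B (Python) =====
-- def solution(gems):
--     for i in range(len(gems) - 1, -1, -1):
--         if gems[i] not in gems[:i]:
--             return [1, i + 1]
--     return [1, 0]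
-- ===== Notes on version B (the rewrite author's own statement) =====
-- stated objective: alternative
-- what changed: Scans backwards from the end with an early return, testing whether gems[i] occurs in the prefix gems[:i], instead of A's forward pass that maintains a visited list and keeps overwriting end; no accumulator state at all.
import Mathlib
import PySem

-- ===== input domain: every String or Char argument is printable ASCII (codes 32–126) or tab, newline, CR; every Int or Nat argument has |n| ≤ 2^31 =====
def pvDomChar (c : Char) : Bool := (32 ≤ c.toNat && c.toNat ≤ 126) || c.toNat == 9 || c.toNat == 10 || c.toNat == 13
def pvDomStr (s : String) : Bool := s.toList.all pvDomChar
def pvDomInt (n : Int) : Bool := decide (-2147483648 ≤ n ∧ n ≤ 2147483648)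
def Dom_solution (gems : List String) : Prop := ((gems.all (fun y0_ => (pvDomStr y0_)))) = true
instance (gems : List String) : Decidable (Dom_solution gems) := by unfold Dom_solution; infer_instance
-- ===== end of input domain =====

-- B replaces A's forward visited-list pass by a backward scan with an early return
-- (first index from the end whose gem is absent from its prefix), dropping A's dead-code
-- list literal; objective: alternative (same result, no accumulated state).

-- ===== PORT A =====
def solution (gems : List String) : List Int :=
  let start : Int := 0
  let r :=
    (PySem.List.enumerate gems 0).foldl
      (fun (st : List String × Int) (p : Int × String) =>
        if p.2 ∉ st.1 then (st.1 ++ [p.2], p.1) else st)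
      (([] : List String), (gems.length : Int) - 1)
  [start + 1, r.2 + 1]

-- ===== PORT B =====
-- fuel k = i + 1: the loop 'for i in range(len(gems)-1, -1, -1)' with its early return
def solAltGo (gems : List String) : Nat → List Int
  | 0 => [1, 0]
  | k + 1 =>
    if PySem.List.pyGetD gems (k : Int) "" ∉ PySem.List.slice gems none (some (k : Int)) then
      [1, (k : Int) + 1]
    else solAltGo gems k

def solution_alt (gems : List String) : List Int := solAltGo gems gems.length

-- ===== PRECONDITION & SPEC =====
def Spec_solution (gems : List String) (out : List Int) : Prop := out = solution_alt gems
instance (gems : List String) (out : List Int) : Decidable (Spec_solution gems out) := by unfold Spec_solution; infer_instance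

-- ===== CLAIM =====
def Claim_equal_solution : Prop := ∀ (gems : List String), Dom_solution gems → Spec_solution gems (solution gems)

-- ===== LEMMAS AND PROOFS =====

-- j is the index of a "new" gem: gems[j] does not occur before position j
def newIdx (gems : List String) (j : Nat) : Bool := decide (gems.getD j "" ∉ gems.take j)

-- last element of a Nat list, cast to Int, with an Int default
def lastD (l : List Nat) (e : Int) : Int := (l.map (fun j : Nat => Int.ofNat j)).getLastD e

lemma lastD_cons (k : Nat) (l : List Nat) (e : Int) : lastD (k :: l) e = lastD l k := by
  unfold lastD
  rw [List.map_cons, List.getLastD_cons]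
  norm_cast

lemma lastD_concat (l : List Nat) (k : Nat) (e : Int) : lastD (l ++ [k]) e = (k : Int) := by
  unfold lastD
  rw [List.map_append, List.map_singleton, List.getLastD_concat]
  norm_cast

lemma lastD_ne_nil (l : List Nat) (h : l ≠ []) (e e' : Int) : lastD l e = lastD l e' := by
  cases l with
  | nil => exact absurd rfl h
  | cons k t => rw [lastD_cons, lastD_cons]

-- B's backward search returns [1, lastNew + 1] over the first k indices
lemma solAltGo_eq (gems : List String) : ∀ (k : Nat),
    solAltGo gems k = [1, lastD ((List.range k).filter (newIdx gems)) (-1) + 1] := by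
  intro k
  induction k with
  | zero => rfl
  | succ k ih =>
    rw [solAltGo, List.range_succ, List.filter_append, List.filter_singleton]
    have hcond : (PySem.List.pyGetD gems (k : Int) "" ∉
        PySem.List.slice gems none (some (k : Int))) ↔ newIdx gems k = true := by
      rw [PySem.List.pyGetD_natCast, PySem.List.slice_to_natCast]
      simp [newIdx, List.getD]
    cases hP : newIdx gems k with
    | true =>
      rw [if_pos (hcond.mpr hP)]
      simp [lastD_concat]
    | false =>
      rw [if_neg (by rw [hcond, hP]; simp), ih]
      simp

-- A's forward loop: from a visited list with the membership of the processed prefix,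
-- the final `end` is the last new index in the remaining suffix (default: the incoming e)
lemma aloop_eq (gems : List String) : ∀ (t pre vis : List String) (e : Int),
    gems = pre ++ t → (∀ g, g ∈ vis ↔ g ∈ pre) →
    ((PySem.List.enumerate t (pre.length : Int)).foldl
      (fun (st : List String × Int) (p : Int × String) =>
        if p.2 ∉ st.1 then (st.1 ++ [p.2], p.1) else st) (vis, e)).2
    = lastD ((List.range' pre.length t.length).filter (newIdx gems)) e := by
  intro t
  induction t with
  | nil => intro pre vis e _ _; simp [PySem.List.enumerate_nil, lastD]
  | cons g t ih =>
    intro pre vis e hg hv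
    have hget : gems[pre.length]? = some g := by
      subst hg
      rw [List.getElem?_append_right (le_refl _)]
      simp
    have htake : gems.take pre.length = pre := by
      subst hg; exact List.take_left
    have hnew : newIdx gems pre.length = true ↔ g ∉ pre := by
      simp [newIdx, List.getD, hget, htake]
    rw [PySem.List.enumerate_cons, List.foldl_cons]
    simp only [List.length_cons]
    rw [List.range'_succ, List.filter_cons]
    by_cases hmem : g ∈ vis
    · have hgpre : g ∈ pre := (hv g).mp hmem
      rw [if_neg (by simp [hmem]), if_neg (by simp [hnew, hgpre])]
      have := ih (pre ++ [g]) vis e (by simp [hg]) (by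
          intro g'; rw [hv g']
          simp only [List.mem_append, List.mem_singleton]
          exact ⟨Or.inl, fun h => h.elim id (fun hh => hh ▸ hgpre)⟩)
      simpa using this
    · have hgpre : g ∉ pre := fun h => hmem ((hv g).mpr h)
      rw [if_pos (by simp [hmem]), if_pos (by simp [hnew, hgpre]), lastD_cons]
      have := ih (pre ++ [g]) (vis ++ [g]) (pre.length : Int) (by simp [hg])
        (by intro g'; simp [hv g'])
      simpa using this

-- for a nonempty list, index 0 is always new, so the filtered list is nonempty
lemma filter_ne_nil (gems : List String) (h : gems ≠ []) :
    (List.range gems.length).filter (newIdx gems) ≠ [] := by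
  have h0 : (0 : Nat) ∈ (List.range gems.length).filter (newIdx gems) := by
    rw [List.mem_filter]
    constructor
    · simp [List.length_pos_iff.mpr h]
    · simp [newIdx]
  exact fun hnil => by simp [hnil] at h0

-- ===== VERDICT =====
theorem solution_spec : Claim_equal_solution := by
  unfold Claim_equal_solution
  intro gems _
  unfold Spec_solution
  have hA := aloop_eq gems gems [] [] ((gems.length : Int) - 1) rfl (by simp)
  simp only [List.length_nil, Nat.cast_zero] at hA
  rw [← List.range_eq_range'] at hA
  have hs : solution gems = [1, ((PySem.List.enumerate gems (0 : Int)).foldl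
      (fun (st : List String × Int) (p : Int × String) =>
        if p.2 ∉ st.1 then (st.1 ++ [p.2], p.1) else st)
      (([] : List String), (gems.length : Int) - 1)).2 + 1] := by
    simp [solution]
  rw [hs, hA, solution_alt, solAltGo_eq]
  cases hgl : gems with
  | nil => subst hgl; norm_num [lastD]
  | cons x xs =>
    rw [← hgl]
    have hne := filter_ne_nil gems (by simp [hgl])
    rw [lastD_ne_nil _ hne ((gems.length : Int) - 1) (-1)]
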